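-- pv_equiv track=rewrite | github.com/nullhack/pytest-beehave | pytest_beehave/stub_reader.py | _collect_markers_reversed
-- ===== SOURCE A (Python) =====
-- def _is_decorator_line(stripped: str) -> bool:
--     """Return True if a stripped line is a decorator.
--
--     Args:
--         stripped: A stripped source line.
--
--     Returns:
--         True if the line starts with '@'.
--     """
--     return stripped.startswith("@")
--
-- def _is_blank_or_comment(stripped: str) -> bool:
--     """Return True if a stripped line is blank or a comment.
--
--     Args:
--         stripped: A stripped source line.
--
--     Returns:
--         True if the line is blank or starts with '#'.
--     """
--     return stripped == "" or stripped.startswith("#")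
--
-- def _collect_markers_reversed(lines: list[str]) -> list[str]:
--     """Collect decorator strings in reverse order from a list of source lines.
--
--     Scans backwards, accumulating decorator lines until a non-decorator,
--     non-blank, non-comment line is found.
--
--     Args:
--         lines: Source lines before a function definition.
--
--     Returns:
--         Decorator strings in reverse order (innermost first).
--     """
--     markers: list[str] = []
--     for line in reversed(lines):
--         stripped = line.strip()
--         if _is_decorator_line(stripped):
--             markers.append(stripped[1:])
--             continue
--         if not _is_blank_or_comment(stripped):
--             break
--     return markers
-- ===== SOURCE B (Python) =====
-- def _is_code(stripped: str) -> bool: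
--     """True if a stripped line is real code: not a decorator, not blank, not a comment."""
--     return not stripped.startswith("@") and stripped != "" and not stripped.startswith("#")
--
-- def _collect_markers_reversed(lines: list[str]) -> list[str]:
--     """Two-phase: find the last real code line, then collect decorators from the tail in reverse."""
--     boundary = -1
--     for i, line in enumerate(lines):
--         if _is_code(line.strip()):
--             boundary = i
--     result: list[str] = []
--     for line in reversed(lines[boundary + 1:]):
--         stripped = line.strip()
--         if stripped.startswith("@"):
--             result.append(stripped[1:])
--     return result
-- ===== Notes on version B (the rewrite author's own statement) =====
-- stated objective: alternative
-- what changed: Replaces the single backward scan with break by a two-phase shape: a forward pass computes the index of the last real code line, then a reverse pass over the tail after it collects only the decorator lines.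
import Mathlib
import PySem

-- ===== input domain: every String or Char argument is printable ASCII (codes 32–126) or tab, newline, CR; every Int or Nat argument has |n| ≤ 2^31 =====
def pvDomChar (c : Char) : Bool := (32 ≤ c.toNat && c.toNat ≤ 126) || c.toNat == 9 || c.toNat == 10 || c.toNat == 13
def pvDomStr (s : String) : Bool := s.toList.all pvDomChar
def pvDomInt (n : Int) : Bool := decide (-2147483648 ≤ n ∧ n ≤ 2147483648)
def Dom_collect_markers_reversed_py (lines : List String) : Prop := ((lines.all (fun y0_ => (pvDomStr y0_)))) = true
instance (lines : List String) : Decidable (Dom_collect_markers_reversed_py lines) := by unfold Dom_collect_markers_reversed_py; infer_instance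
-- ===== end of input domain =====

-- B replaces A's backward scan-with-break by a forward last-code-line index pass plus a reverse
-- collection pass over the tail after it (alternative decomposition, same cost).


-- ===== PORT A =====
def is_decorator_line_py (stripped : String) : Bool :=
  PySem.Str.startswith stripped "@"

def is_blank_or_comment_py (stripped : String) : Bool :=
  (stripped == "") || PySem.Str.startswith stripped "#"

-- the backward for-loop with `continue`/`break`, as structural recursion over reversed lines
def pvGoA : List String → List String → List String
  | [], markers => markers
  | line :: rest, markers =>
    let stripped := PySem.Str.strip line
    if is_decorator_line_py stripped then
      pvGoA rest (markers ++ [PySem.Str.slice stripped (some 1) none])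
    else if !(is_blank_or_comment_py stripped) then
      markers
    else
      pvGoA rest markers

def collect_markers_reversed_py (lines : List String) : List String :=
  pvGoA lines.reverse []

-- ===== PORT B =====
def pvIsCodeB (stripped : String) : Bool :=
  !PySem.Str.startswith stripped "@" && !(stripped == "") && !PySem.Str.startswith stripped "#"

-- phase 1: forward pass, index of the last real code line (-1 if none)
def pvBoundaryB (lines : List String) : Int :=
  (PySem.List.enumerate lines 0).foldl
    (fun b p => if pvIsCodeB (PySem.Str.strip p.2) then p.1 else b) (-1)

-- phase 2: collect decorators from the tail after the boundary, in reverse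
def collect_markers_reversed_py_alt (lines : List String) : List String :=
  (PySem.List.slice lines (some (pvBoundaryB lines + 1)) none).reverse.foldl
    (fun result line =>
      let stripped := PySem.Str.strip line
      if PySem.Str.startswith stripped "@" then
        result ++ [PySem.Str.slice stripped (some 1) none]
      else result) []

-- ===== PRECONDITION & SPEC =====
def Spec_collect_markers_reversed_py (lines : List String) (out : List String) : Prop := out = collect_markers_reversed_py_alt lines
instance (lines : List String) (out : List String) : Decidable (Spec_collect_markers_reversed_py lines out) := by unfold Spec_collect_markers_reversed_py; infer_instance

-- ===== CLAIM (what is proved, stated in full; the proofs are below) =====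
def Claim_equal_collect_markers_reversed_py : Prop := ∀ (lines : List String), Dom_collect_markers_reversed_py lines → Spec_collect_markers_reversed_py lines (collect_markers_reversed_py lines)

-- ===== LEMMAS AND PROOFS =====

-- "non-code" predicate on a raw line (decorator, blank or comment after stripping)
def pvNC (line : String) : Bool :=
  is_decorator_line_py (PySem.Str.strip line) || is_blank_or_comment_py (PySem.Str.strip line)

theorem pvIsCodeB_eq_not_pvNC (line : String) :
    pvIsCodeB (PySem.Str.strip line) = !pvNC line := by
  simp [pvIsCodeB, pvNC, is_decorator_line_py, is_blank_or_comment_py, Bool.and_assoc]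

-- A's loop computes: decorators among the longest non-code suffix (read backwards)
theorem pvGoA_eq (rs : List String) (markers : List String) :
    pvGoA rs markers =
      markers ++ ((rs.takeWhile pvNC).filter (fun l => is_decorator_line_py (PySem.Str.strip l))).map
        (fun l => PySem.Str.slice (PySem.Str.strip l) (some 1) none) := by
  induction rs generalizing markers with
  | nil => simp [pvGoA]
  | cons line rest ih =>
    by_cases hd : is_decorator_line_py (PySem.Str.strip line) = true
    · have hnc : pvNC line = true := by simp [pvNC, hd]
      simp [pvGoA, hd, hnc, ih]
    · by_cases hb : is_blank_or_comment_py (PySem.Str.strip line) = true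
      · have hnc : pvNC line = true := by simp [pvNC, hb]
        simp [pvGoA, hd, hb, hnc, ih]
      · have hnc : pvNC line = false := by simp [pvNC, hd, hb]
        simp [pvGoA, hd, hb, hnc]

-- one step of the boundary fold on an appended line
theorem pvBoundaryB_step (ls : List String) (x : String) :
    pvBoundaryB (ls ++ [x]) =
      if pvIsCodeB (PySem.Str.strip x) then (ls.length : Int) else pvBoundaryB ls := by
  unfold pvBoundaryB
  rw [PySem.List.enumerate_append, List.foldl_append]
  simp [PySem.List.enumerate_cons]

-- boundary bounds: -1 <= boundary < length
theorem pvBoundaryB_bounds (lines : List String) :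
    -1 ≤ pvBoundaryB lines ∧ pvBoundaryB lines < lines.length := by
  induction lines using List.reverseRecOn with
  | nil => simp [pvBoundaryB]
  | append_singleton ls x ih =>
    rw [pvBoundaryB_step]
    split
    · simp
    · simp
      omega

-- the tail after the boundary is the longest all-non-code suffix
theorem pvBoundaryB_drop (lines : List String) :
    lines.drop (pvBoundaryB lines + 1).toNat = (lines.reverse.takeWhile pvNC).reverse := by
  induction lines using List.reverseRecOn with
  | nil => simp [pvBoundaryB]
  | append_singleton ls x ih =>
    have hb := pvBoundaryB_bounds ls
    rw [pvBoundaryB_step]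
    by_cases hc : pvIsCodeB (PySem.Str.strip x) = true
    · have hnc : pvNC x = false := by
        have h := pvIsCodeB_eq_not_pvNC x
        rw [hc] at h
        simpa using h.symm
      have ht : (((ls.length : Int)) + 1).toNat = ls.length + 1 := by omega
      simp [hc, hnc, ht]
    · have hnc : pvNC x = true := by
        have h := pvIsCodeB_eq_not_pvNC x
        rw [Bool.eq_false_iff.mpr hc] at h
        simpa using h.symm
      rw [if_neg hc, List.drop_append_of_le_length (by omega)]
      simp [hnc, ih]

-- B's second loop is filter-then-map
theorem pvCollectB_eq (xs : List String) (acc : List String) :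
    xs.foldl
      (fun result line =>
        let stripped := PySem.Str.strip line
        if PySem.Str.startswith stripped "@" then
          result ++ [PySem.Str.slice stripped (some 1) none]
        else result) acc =
    acc ++ (xs.filter (fun l => is_decorator_line_py (PySem.Str.strip l))).map
      (fun l => PySem.Str.slice (PySem.Str.strip l) (some 1) none) := by
  induction xs generalizing acc with
  | nil => simp
  | cons line rest ih =>
    rw [List.foldl_cons, ih]
    by_cases hc : PySem.Chars.startswith (PySem.Chars.strip line.toList) ['@'] = true
    · simp [is_decorator_line_py, hc]
    · simp [is_decorator_line_py, hc]

-- ===== VERDICT (by name: the statement is the Claim_ definition above) =====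
theorem collect_markers_reversed_py_spec : Claim_equal_collect_markers_reversed_py := by
  intro lines _
  unfold Spec_collect_markers_reversed_py collect_markers_reversed_py collect_markers_reversed_py_alt
  have hb := pvBoundaryB_bounds lines
  rw [PySem.List.slice_from _ (by omega), pvBoundaryB_drop, pvGoA_eq, pvCollectB_eq]
  simp
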